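-- pv_equiv track=rewrite | github.com/xoxown31/Baekjoon | 프로그래머스/2/42860. 조이스틱/조이스틱.py | solution
-- ===== SOURCE A (Python) =====
-- def solution(s):
--     a = sum(min(ord(c)-ord('A'), ord('Z')-ord(c)+1) for c in s)
--
--     n = len(s)
--
--     b = n - 1
--     for i in range(n):
--         j = i + 1
--         while j < n and s[j] == 'A':
--             j += 1
--         b = min(2*i + n - j, i + 2*(n - j), b)
--
--     return a + b
-- ===== SOURCE B (Python) =====
-- def solution(s):
--     a = sum(min(ord(c) - ord('A'), ord('Z') - ord(c) + 1) for c in s)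
--
--     n = len(s)
--
--     b = n - 1
--     j = n  # index of the next non-'A' character strictly after the cursor (n if none)
--     for i in range(n - 1, -1, -1):
--         if i + 1 < n and s[i + 1] != 'A':
--             j = i + 1
--         b = min(b, 2 * i + n - j, i + 2 * (n - j))
--
--     return a + b
-- ===== Notes on version B (the rewrite author's own statement) =====
-- stated objective: alternative
-- what changed: Replaced A's forward loop with a per-index inner while-scan for the next non-'A' character by a single right-to-left pass that maintains that index incrementally while folding the same min terms.
import Mathlib
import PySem

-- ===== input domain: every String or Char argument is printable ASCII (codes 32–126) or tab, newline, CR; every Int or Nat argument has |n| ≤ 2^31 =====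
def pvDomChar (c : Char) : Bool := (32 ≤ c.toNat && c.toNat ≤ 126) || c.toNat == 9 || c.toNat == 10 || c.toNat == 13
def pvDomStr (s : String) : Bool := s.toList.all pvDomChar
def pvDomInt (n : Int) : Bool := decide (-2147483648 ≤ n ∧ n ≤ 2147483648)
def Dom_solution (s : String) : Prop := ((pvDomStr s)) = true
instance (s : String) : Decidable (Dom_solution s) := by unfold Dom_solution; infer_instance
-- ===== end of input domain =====

-- B replaces A's per-index inner while-scan for the next non-'A' character by a single
-- right-to-left pass that maintains that index incrementally; same return value.

-- ===== PORT A =====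
-- the inner "while j < n and s[j] == 'A': j += 1" loop of A
def pvScan (l : List Char) (j : Int) : Int :=
  if h : j < (l.length : Int) ∧ PySem.List.pyGet? l j = some 'A' then pvScan l (j + 1)
  else j
termination_by ((l.length : Int) - j).toNat
decreasing_by
  obtain ⟨h1, _⟩ := h
  omega

-- the body of A's "for i in range(n)" loop
def pvStepA (l : List Char) (b : Int) (i : Int) : Int :=
  let n : Int := l.length
  let j := pvScan l (i + 1)
  min (min (2 * i + n - j) (i + 2 * (n - j))) b

def solution (s : String) : Int :=
  let l := s.toList
  let a := l.foldl (fun acc c => acc + min ((c.toNat : Int) - 65) (90 - (c.toNat : Int) + 1)) 0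
  let n : Int := l.length
  let b := (PySem.List.pyRange 0 n 1).foldl (pvStepA l) (n - 1)
  a + b

-- ===== PORT B =====
-- the body of B's "for i in range(n-1, -1, -1)" loop; the state is the pair (j, b)
def pvStepB (l : List Char) (st : Int × Int) (i : Int) : Int × Int :=
  let n : Int := l.length
  let j := if i + 1 < n ∧ PySem.List.pyGet? l (i + 1) ≠ some 'A' then i + 1 else st.1
  (j, min (min st.2 (2 * i + n - j)) (i + 2 * (n - j)))

def solution_alt (s : String) : Int :=
  let l := s.toList
  let a := l.foldl (fun acc c => acc + min ((c.toNat : Int) - 65) (90 - (c.toNat : Int) + 1)) 0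
  let n : Int := l.length
  let st := (PySem.List.pyRange (n - 1) (-1) (-1)).foldl (pvStepB l) (n, n - 1)
  a + st.2

-- ===== PRECONDITION & SPEC =====
def Spec_solution (s : String) (out : Int) : Prop := out = solution_alt s
instance (s : String) (out : Int) : Decidable (Spec_solution s out) := by unfold Spec_solution; infer_instance

-- ===== CLAIM (what is proved, stated in full; the proofs are below) =====
def Claim_equal_solution : Prop := ∀ (s : String), Dom_solution s → Spec_solution s (solution s)

-- ===== LEMMAS AND PROOFS =====

-- the i-th candidate term min(2*i + n - j, i + 2*(n - j)) with j = pvScan l (i+1)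
def pvT (l : List Char) (k : Nat) : Int :=
  let n : Int := l.length
  let j := pvScan l ((k : Int) + 1)
  min (2 * (k : Int) + n - j) ((k : Int) + 2 * (n - j))

-- A's accumulator after its first k iterations (i = 0 … k-1), as a recursion
def pvFA (l : List Char) : Nat → Int → Int
  | 0, b => b
  | k + 1, b => min (pvT l k) (pvFA l k b)

-- B's accumulator over its iterations i = k-1, k-2, …, 0, as a recursion
def pvRB (l : List Char) : Nat → Int → Int
  | 0, b => b
  | k + 1, b =>
    let n : Int := l.length
    let j := pvScan l ((k : Int) + 1)
    pvRB l k (min (min b (2 * (k : Int) + n - j)) ((k : Int) + 2 * (n - j)))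

lemma pvRB_min (l : List Char) : ∀ (k : Nat) (b c : Int),
    pvRB l k (min b c) = min c (pvRB l k b) := by
  intro k
  induction k with
  | zero => intro b c; simp [pvRB]; omega
  | succ k ih =>
    intro b c
    simp only [pvRB]
    rw [show min (min (min b c) (2 * (k : Int) + l.length - pvScan l ((k : Int) + 1)))
          ((k : Int) + 2 * ((l.length : Int) - pvScan l ((k : Int) + 1)))
        = min (min (min b (2 * (k : Int) + l.length - pvScan l ((k : Int) + 1)))
          ((k : Int) + 2 * ((l.length : Int) - pvScan l ((k : Int) + 1)))) c from by omega]
    exact ih _ c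

lemma pvRB_eq_pvFA (l : List Char) : ∀ (k : Nat) (b : Int), pvRB l k b = pvFA l k b := by
  intro k
  induction k with
  | zero => intro b; rfl
  | succ k ih =>
    intro b
    simp only [pvRB, pvFA]
    rw [show min (min b (2 * (k : Int) + l.length - pvScan l ((k : Int) + 1)))
          ((k : Int) + 2 * ((l.length : Int) - pvScan l ((k : Int) + 1)))
        = min b (pvT l k) from by simp only [pvT]; omega]
    rw [pvRB_min l k b (pvT l k), ih]

lemma foldA_eq (l : List Char) : ∀ (k : Nat) (b : Int),
    (PySem.List.pyRange 0 (k : Int) 1).foldl (pvStepA l) b = pvFA l k b := by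
  intro k
  induction k with
  | zero => intro b; rw [PySem.List.pyRange_one_eq_nil (by omega)]; rfl
  | succ k ih =>
    intro b
    rw [show ((k + 1 : Nat) : Int) = (k : Int) + 1 from by push_cast; ring,
        PySem.List.pyRange_one_succ_right (by omega), List.foldl_append, ih]
    simp only [List.foldl, pvStepA, pvFA, pvT]

lemma pvScan_len (l : List Char) : pvScan l (l.length : Int) = (l.length : Int) := by
  rw [pvScan]; simp

lemma foldB_eq (l : List Char) : ∀ (k : Nat), k ≤ l.length → ∀ (b : Int),
    ((PySem.List.pyRange ((k : Int) - 1) (-1) (-1)).foldl (pvStepB l)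
      (pvScan l ((min (k + 1) l.length : Nat) : Int), b)).2 = pvRB l k b := by
  intro k
  induction k with
  | zero =>
    intro _ b
    rw [show ((0 : Nat) : Int) - 1 = -1 from by norm_num,
        PySem.List.pyRange_neg_one_eq_nil (by omega)]
    rfl
  | succ k ih =>
    intro hk b
    have hk' : k + 1 ≤ l.length := hk
    rw [show ((k + 1 : Nat) : Int) - 1 = (k : Int) from by push_cast; ring,
        PySem.List.pyRange_neg_one_cons (by omega), List.foldl_cons]
    have hmin : (min (k + 1 + 1) l.length : Nat) = min (k + 2) l.length := by omega
    -- the updated j equals pvScan l (k+1)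
    have hj : (pvStepB l (pvScan l ((min (k + 1 + 1) l.length : Nat) : Int), b) (k : Int)).1
        = pvScan l ((k : Int) + 1) := by
      simp only [pvStepB, hmin]
      by_cases hc : (k : Int) + 1 < (l.length : Int) ∧
          PySem.List.pyGet? l ((k : Int) + 1) ≠ some 'A'
      · rw [if_pos hc]
        rw [pvScan]
        rw [dif_neg (by tauto)]
      · rw [if_neg hc]
        by_cases hlt : (k : Int) + 1 < (l.length : Int)
        · -- s[k+1] == 'A': pvScan l (k+1) = pvScan l (k+2)
          have hA : PySem.List.pyGet? l ((k : Int) + 1) = some 'A' := by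
            by_contra h; exact hc ⟨hlt, h⟩
          conv_rhs => rw [pvScan]
          rw [dif_pos ⟨hlt, hA⟩]
          congr 1
          have : (min (k + 2) l.length : Nat) = k + 2 := by omega
          rw [this]; push_cast; ring
        · -- k+1 = n
          have hEq : (min (k + 2) l.length : Nat) = l.length := by omega
          have hEq2 : ((l.length : Nat) : Int) = (k : Int) + 1 := by
            have : l.length = k + 1 := by omega
            rw [this]; push_cast; ring
          rw [hEq, hEq2]
    -- rewrite the state after one step and apply the induction hypothesis
    have hjmin : ((min (k + 1) l.length : Nat) : Int) = (k : Int) + 1 := by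
      have h : (min (k + 1) l.length : Nat) = k + 1 := by omega
      rw [h]; push_cast; ring
    have hst : pvStepB l (pvScan l ((min (k + 1 + 1) l.length : Nat) : Int), b) (k : Int)
        = (pvScan l ((min (k + 1) l.length : Nat) : Int),
           min (min b (2 * (k : Int) + l.length - pvScan l ((k : Int) + 1)))
             ((k : Int) + 2 * ((l.length : Int) - pvScan l ((k : Int) + 1)))) := by
      have h1 := hj
      simp only [pvStepB] at h1 ⊢
      rw [h1, hjmin]
    rw [hst, ih (by omega)]
    simp only [pvRB]

theorem solution_spec : Claim_equal_solution := by
  intro s _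
  show solution s = solution_alt s
  unfold solution solution_alt
  simp only []
  have h1 : ((s.toList.length : Int), (s.toList.length : Int) - 1)
      = (pvScan s.toList ((min (s.toList.length + 1) s.toList.length : Nat) : Int),
         (s.toList.length : Int) - 1) := by
    have h : (min (s.toList.length + 1) s.toList.length : Nat) = s.toList.length := by omega
    rw [h, pvScan_len]
  rw [h1, foldB_eq s.toList s.toList.length (le_refl _), pvRB_eq_pvFA,
      foldA_eq s.toList s.toList.length]
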